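-- pv_equiv track=rewrite | github.com/bjhardcastle/lazynwb | src/lazynwb/_zarr/reader.py | _zarr_metadata_path_from_key
-- ===== SOURCE A (Python) =====
-- def _zarr_metadata_path_from_key(key: str) -> str | None:
--     for filename in (".zarray", ".zattrs", ".zgroup"):
--         if key == filename:
--             return ""
--         suffix = f"/{filename}"
--         if key.endswith(suffix):
--             return key[: -len(suffix)]
--     return None
-- ===== SOURCE B (Python) =====
-- def _zarr_metadata_path_from_key(key: str) -> str | None:
--     head, _sep, name = key.rpartition('/')
--     if name in {'.zarray', '.zattrs', '.zgroup'}: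
--         return head
--     return None
-- ===== Notes on version B (the rewrite author's own statement) =====
-- stated objective: simpler
-- what changed: Replaced the loop of per-filename equality and endswith suffix checks by a single rpartition split at the last slash followed by one set-membership test on the basename.
import Mathlib
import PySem

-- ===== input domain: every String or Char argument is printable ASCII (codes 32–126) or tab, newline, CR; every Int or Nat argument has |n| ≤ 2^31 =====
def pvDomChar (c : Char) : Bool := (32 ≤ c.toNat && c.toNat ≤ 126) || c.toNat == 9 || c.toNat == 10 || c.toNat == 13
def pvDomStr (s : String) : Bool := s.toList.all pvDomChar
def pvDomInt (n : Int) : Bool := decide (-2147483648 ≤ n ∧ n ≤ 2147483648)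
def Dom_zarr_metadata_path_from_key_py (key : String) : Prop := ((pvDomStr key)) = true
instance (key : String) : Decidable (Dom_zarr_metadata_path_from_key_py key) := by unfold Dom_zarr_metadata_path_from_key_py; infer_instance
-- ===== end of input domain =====

-- B replaces A's loop of per-filename equality/endswith checks by a single rpartition split
-- plus one membership test on the basename (objective: simpler).

-- ===== PORT A =====
-- one iteration of A's loop body for a filename f:
-- 'if key == filename: return ""', then 'if key.endswith("/"+filename): return key[:-len(suffix)]'
def pvAStep (l f : List Char) : Option (List Char) :=
  if l = f then some []
  else if PySem.Chars.endswith l ('/' :: f) then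
    some (PySem.List.slice l none (some (-((('/' :: f).length : Nat) : Int))))
  else none

-- A's 'for filename in (...)' loop: first hit returns, fall through to None
def pvALoop (l : List Char) : List (List Char) → Option (List Char)
  | [] => none
  | f :: fs =>
    match pvAStep l f with
    | some h => some h
    | none => pvALoop l fs

def zarr_metadata_path_from_key_py (key : String) : Option String :=
  (pvALoop key.toList [".zarray".toList, ".zattrs".toList, ".zgroup".toList]).map String.mk

-- ===== PORT B =====
-- key.rpartition ported by hand over List Char (exact: splits at the LAST slash; head is
-- empty when the key has no slash; the separator component is omitted since B never uses it)
def pvRPartitionSlash (l : List Char) : List Char × List Char :=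
  let r := l.reverse
  (((r.dropWhile (· != '/')).drop 1).reverse, (r.takeWhile (· != '/')).reverse)

def zarr_metadata_path_from_key_py_alt (key : String) : Option String :=
  let p := pvRPartitionSlash key.toList
  if p.2 = ".zarray".toList ∨ p.2 = ".zattrs".toList ∨ p.2 = ".zgroup".toList
  then some (String.mk p.1) else none

-- ===== PRECONDITION & SPEC =====
def Spec_zarr_metadata_path_from_key_py (key : String) (out : Option String) : Prop := out = zarr_metadata_path_from_key_py_alt key
instance (key : String) (out : Option String) : Decidable (Spec_zarr_metadata_path_from_key_py key out) := by unfold Spec_zarr_metadata_path_from_key_py; infer_instance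

-- ===== CLAIM (what is proved, stated in full; the proofs are below) =====
def Claim_equal_zarr_metadata_path_from_key_py : Prop := ∀ (key : String), Dom_zarr_metadata_path_from_key_py key → Spec_zarr_metadata_path_from_key_py key (zarr_metadata_path_from_key_py key)

-- ===== LEMMAS AND PROOFS =====

-- takeWhile/dropWhile across "good ++ '/' :: rest"
theorem pv_tw_append (g rest : List Char) (hg : ∀ c ∈ g, c ≠ '/') :
    (g ++ '/' :: rest).takeWhile (· != '/') = g ∧
    (g ++ '/' :: rest).dropWhile (· != '/') = '/' :: rest := by
  induction g with
  | nil => simp [List.dropWhile]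
  | cons a g ih =>
    have ha : a ≠ '/' := hg a (by simp)
    have ih' := ih (fun c hc => hg c (by simp [hc]))
    simp [ha, ih'.1, ih'.2]

-- head of a nonempty dropWhile fails the predicate
theorem pv_dw_head (p : Char → Bool) (l d : List Char) (c : Char)
    (h : l.dropWhile p = c :: d) : p c = false := by
  induction l with
  | nil => simp [List.dropWhile] at h
  | cons a l ih =>
    by_cases hp : p a
    · exact ih (by simpa [hp] using h)
    · simp [hp] at h
      simpa [← h.1] using hp

-- slash-free lists satisfy the predicate everywhere
theorem pv_tw_self (f : List Char) (hf : ∀ c ∈ f, c ≠ '/') :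
    f.takeWhile (· != '/') = f ∧ f.dropWhile (· != '/') = [] := by
  induction f with
  | nil => simp [List.dropWhile]
  | cons a g ih =>
    have ha : a ≠ '/' := hf a (by simp)
    have ih' := ih (fun c hc => hf c (by simp [hc]))
    simp [ha, ih'.1, ih'.2]

-- if the basename equals slash-free f then key = f or key ends with '/'++f
theorem pv_name_conv (l f : List Char) (hf : ∀ c ∈ f, c ≠ '/')
    (ht : l.reverse.takeWhile (· != '/') = f.reverse) :
    l = f ∨ ('/' :: f) <:+ l := by
  have hsplit : l.reverse = f.reverse ++ l.reverse.dropWhile (· != '/') := by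
    conv_lhs => rw [← List.takeWhile_append_dropWhile (p := (· != '/')) (l := l.reverse)]
    rw [ht]
  cases hd : l.reverse.dropWhile (· != '/') with
  | nil =>
    left
    have : l.reverse = f.reverse := by rw [hsplit, hd, List.append_nil]
    simpa using congrArg List.reverse this
  | cons c d =>
    right
    have hc : c = '/' := by
      have := pv_dw_head _ _ _ _ hd
      simpa using this
    have hl : l = d.reverse ++ '/' :: f := by
      have := congrArg List.reverse (hsplit.trans (by rw [hd, hc]))
      simpa using this
    exact ⟨d.reverse, hl.symm⟩

-- a matching filename f yields the same result in both programs
theorem pv_step (l f : List Char) (hf : ∀ c ∈ f, c ≠ '/')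
    (h : l = f ∨ ('/' :: f) <:+ l) :
    (pvRPartitionSlash l).2 = f ∧ pvAStep l f = some (pvRPartitionSlash l).1 := by
  rcases h with h | ⟨s, hs⟩
  · subst h
    have hfr : ∀ c ∈ l.reverse, c ≠ '/' := fun c hc => hf c (by simpa using hc)
    obtain ⟨htw, hdw⟩ := pv_tw_self l.reverse hfr
    refine ⟨by simp [pvRPartitionSlash, htw], ?_⟩
    unfold pvAStep
    rw [if_pos rfl]
    simp [pvRPartitionSlash, hdw]
  · subst hs
    have hrev : (s ++ '/' :: f).reverse = f.reverse ++ '/' :: s.reverse := by simp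
    have hfr : ∀ c ∈ f.reverse, c ≠ '/' := fun c hc => hf c (by simpa using hc)
    obtain ⟨htw, hdw⟩ := pv_tw_append f.reverse s.reverse hfr
    have hne : (s ++ '/' :: f) ≠ f := by
      intro he
      have := congrArg List.length he
      simp at this; omega
    have hend : PySem.Chars.endswith (s ++ '/' :: f) ('/' :: f) = true :=
      (PySem.Chars.endswith_iff _ _).mpr ⟨s, rfl⟩
    refine ⟨by simp [pvRPartitionSlash, hrev, htw], ?_⟩
    unfold pvAStep
    rw [if_neg hne, if_pos hend]
    have hslice : PySem.List.slice (s ++ '/' :: f) none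
        (some (-((('/' :: f).length : Nat) : Int)))
        = (s ++ '/' :: f).take ((s ++ '/' :: f).length - ('/' :: f).length) :=
      PySem.List.slice_to_neg_natCast _ _ (by simp)
    rw [hslice]
    have htake : (s ++ '/' :: f).take ((s ++ '/' :: f).length - ('/' :: f).length) = s := by
      simp
    rw [htake]
    simp [pvRPartitionSlash, hrev, hdw]

-- a non-matching filename f: A's loop body returns None and the basename differs from f
theorem pv_nostep (l f : List Char) (hf : ∀ c ∈ f, c ≠ '/')
    (h : ¬ (l = f ∨ ('/' :: f) <:+ l)) :
    pvAStep l f = none ∧ (pvRPartitionSlash l).2 ≠ f := by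
  constructor
  · unfold pvAStep
    rw [if_neg (fun he => h (Or.inl he)), if_neg]
    intro hc
    exact h (Or.inr ((PySem.Chars.endswith_iff _ _).mp hc))
  · intro he
    have ht : l.reverse.takeWhile (· != '/') = f.reverse := by
      have := congrArg List.reverse he
      simpa [pvRPartitionSlash] using this
    exact h (pv_name_conv l f hf ht)

theorem zarr_main (l : List Char) :
    (pvALoop l [".zarray".toList, ".zattrs".toList, ".zgroup".toList]).map String.mk
      = (if (pvRPartitionSlash l).2 = ".zarray".toList ∨
            (pvRPartitionSlash l).2 = ".zattrs".toList ∨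
            (pvRPartitionSlash l).2 = ".zgroup".toList
         then some (String.mk (pvRPartitionSlash l).1) else none) := by
  have e1 : ".zarray".toList = ['.','z','a','r','r','a','y'] := rfl
  have e2 : ".zattrs".toList = ['.','z','a','t','t','r','s'] := rfl
  have e3 : ".zgroup".toList = ['.','z','g','r','o','u','p'] := rfl
  have mem7 : ∀ (a b c d e f g : Char), (∀ x ∈ [a,b,c,d,e,f,g], x ≠ '/') ↔
      (a ≠ '/' ∧ b ≠ '/' ∧ c ≠ '/' ∧ d ≠ '/' ∧ e ≠ '/' ∧ f ≠ '/' ∧ g ≠ '/') := by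
    intro a b c d e f g
    constructor
    · intro h
      exact ⟨h a (by simp), h b (by simp), h c (by simp), h d (by simp),
             h e (by simp), h f (by simp), h g (by simp)⟩
    · rintro ⟨h1,h2,h3,h4,h5,h6,h7⟩ x hx
      simp only [List.mem_cons, List.not_mem_nil, or_false] at hx
      rcases hx with h|h|h|h|h|h|h <;> subst h <;> assumption
  have hf1 : ∀ c ∈ ".zarray".toList, c ≠ '/' := by
    rw [e1, mem7]; refine ⟨?_,?_,?_,?_,?_,?_,?_⟩ <;> decide
  have hf2 : ∀ c ∈ ".zattrs".toList, c ≠ '/' := by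
    rw [e2, mem7]; refine ⟨?_,?_,?_,?_,?_,?_,?_⟩ <;> decide
  have hf3 : ∀ c ∈ ".zgroup".toList, c ≠ '/' := by
    rw [e3, mem7]; refine ⟨?_,?_,?_,?_,?_,?_,?_⟩ <;> decide
  by_cases h1 : l = ".zarray".toList ∨ ('/' :: ".zarray".toList) <:+ l
  · obtain ⟨hn, hs⟩ := pv_step _ _ hf1 h1
    have hloop : pvALoop l [".zarray".toList, ".zattrs".toList, ".zgroup".toList]
        = some (pvRPartitionSlash l).1 := by
      simp only [pvALoop, hs]
    rw [hloop, if_pos (Or.inl hn)]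
    rfl
  · obtain ⟨ha1, _⟩ := pv_nostep _ _ hf1 h1
    by_cases h2 : l = ".zattrs".toList ∨ ('/' :: ".zattrs".toList) <:+ l
    · obtain ⟨hn, hs⟩ := pv_step _ _ hf2 h2
      have hloop : pvALoop l [".zarray".toList, ".zattrs".toList, ".zgroup".toList]
          = some (pvRPartitionSlash l).1 := by
        simp only [pvALoop, ha1, hs]
      rw [hloop, if_pos (Or.inr (Or.inl hn))]
      rfl
    · obtain ⟨ha2, _⟩ := pv_nostep _ _ hf2 h2
      by_cases h3 : l = ".zgroup".toList ∨ ('/' :: ".zgroup".toList) <:+ l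
      · obtain ⟨hn, hs⟩ := pv_step _ _ hf3 h3
        have hloop : pvALoop l [".zarray".toList, ".zattrs".toList, ".zgroup".toList]
            = some (pvRPartitionSlash l).1 := by
          simp only [pvALoop, ha1, ha2, hs]
        rw [hloop, if_pos (Or.inr (Or.inr hn))]
        rfl
      · obtain ⟨ha3, hn3⟩ := pv_nostep _ _ hf3 h3
        obtain ⟨_, hn1⟩ := pv_nostep _ _ hf1 h1
        obtain ⟨_, hn2⟩ := pv_nostep _ _ hf2 h2
        have hloop : pvALoop l [".zarray".toList, ".zattrs".toList, ".zgroup".toList]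
            = none := by
          simp only [pvALoop, ha1, ha2, ha3]
        rw [hloop, if_neg]
        · rfl
        · rintro (h | h | h)
          · exact hn1 h
          · exact hn2 h
          · exact hn3 h

-- ===== VERDICT (by name: the statement is the Claim_ definition above) =====
theorem zarr_metadata_path_from_key_py_spec : Claim_equal_zarr_metadata_path_from_key_py := by
  intro key _
  show zarr_metadata_path_from_key_py key = zarr_metadata_path_from_key_py_alt key
  unfold zarr_metadata_path_from_key_py zarr_metadata_path_from_key_py_alt
  exact zarr_main key.toList
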